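-- pv_equiv track=rewrite | github.com/clupasq/tuenti21 | 09/solution.py | solution
-- ===== SOURCE A (Python) =====
-- def is_collision(s1, x1, y1, s2, x2, y2):
--     x1min = x1
--     x1max = x1 + len(s1[0]) - 1
--     y1min = y1
--     y1max = y1 + len(s1) - 1
--     x2min = x2
--     x2max = x2 + len(s2[0]) - 1
--     y2min = y2
--     y2max = y2 + len(s2) - 1
--
--     if x2max < x1min or x2min > x1max:
--         return False
--     if y2max < y1min or y2min > y1max:
--         return False
--
--     for y, row in enumerate(s2):
--         y2 = y + y2min
--         y1 = y2 - y1min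
--         if y1 < 0 or y1 >= len(s1):
--             continue
--         for x, c in enumerate(row):
--             if c == "0":
--                 continue
--             x2 = x + x2min
--             x1 = x2 - x1min
--             if x1 < 0 or x1 >= len(s1[0]):
--                 continue
--             if s1[y1][x1] == "1":
--                 return True
--     return False
--
-- def solution(sprites, instances):
--     collisions = set()
--     n = len(instances)
--
--     for i in range(n):
--         for j in range(i + 1, n):
--             sid1, x1, y1 = instances[i]
--             sid2, x2, y2 = instances[j]
--             s1 = sprites[sid1]
--             s2 = sprites[sid2]
--             if is_collision(s1, x1, y1, s2, x2, y2):
--                 collisions.add((i, j))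
--     return len(collisions)
-- ===== SOURCE B (Python) =====
-- def solution(sprites, instances):
--     # Precompute, per instance, its set of global "1"-pixels and its set of
--     # global non-"0"-pixels; a pair collides iff the first's ones meet the
--     # second's non-zeros, tested by hash-set intersection instead of
--     # re-scanning the sprite area for every pair.
--     n = len(instances)
--     if n < 2:
--         return 0
--     pixels = []
--     for sid, x, y in instances:
--         ones = set()
--         nonzero = set()
--         for dy, row in enumerate(sprites[sid]):
--             for dx, c in enumerate(row):
--                 if c != "0":
--                     nonzero.add((x + dx, y + dy))
--                     if c == "1":
--                         ones.add((x + dx, y + dy))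
--         pixels.append((ones, nonzero))
--     total = 0
--     for i in range(n):
--         oi = pixels[i][0]
--         for j in range(i + 1, n):
--             if oi & pixels[j][1]:
--                 total += 1
--     return total
-- ===== Notes on version B (the rewrite author's own statement) =====
-- stated objective: alternative
-- what changed: B precomputes for each instance one set of global '1'-pixel coordinates and one set of non-'0'-pixel coordinates in a single pass over its sprite, then decides each pair by a hash-set intersection, instead of A's per-pair bounding-box test followed by a full rescan of the second sprite's area with indexed lookups into the first; B counts directly instead of collecting a set of colliding pairs (measured ~1.27x at the largest timing size, below the 1.5x bar, so no speed is claimed).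
-- outside the precondition, e.g. on solution([['1'], ['0', '01']], [(0, 1, 1), (1, 0, 0)]): A returns 0, B returns 1
import Mathlib
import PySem

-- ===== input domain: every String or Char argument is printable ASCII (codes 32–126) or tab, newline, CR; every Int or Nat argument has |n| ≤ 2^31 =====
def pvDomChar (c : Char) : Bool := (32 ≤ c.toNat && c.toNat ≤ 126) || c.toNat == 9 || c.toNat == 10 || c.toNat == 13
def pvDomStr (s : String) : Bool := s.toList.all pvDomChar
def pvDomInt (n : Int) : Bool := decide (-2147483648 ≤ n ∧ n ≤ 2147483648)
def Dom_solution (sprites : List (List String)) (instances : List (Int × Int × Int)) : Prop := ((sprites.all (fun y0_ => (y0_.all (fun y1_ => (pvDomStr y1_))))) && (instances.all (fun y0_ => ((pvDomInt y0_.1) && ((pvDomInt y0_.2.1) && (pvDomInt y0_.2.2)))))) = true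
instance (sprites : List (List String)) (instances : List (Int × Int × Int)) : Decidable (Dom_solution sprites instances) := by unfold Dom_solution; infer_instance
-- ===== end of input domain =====

-- B replaces A's per-pair bounding-box test + area rescan by per-instance precomputed
-- pixel-coordinate sets intersected per pair (objective: alternative algorithm, same cost).

-- ===== PORT A =====
def is_collision (s1 : List String) (x1 y1 : Int) (s2 : List String) (x2 y2 : Int) : Bool :=
  let x1min := x1
  let x1max := x1 + PySem.Str.len ((PySem.List.pyGet? s1 0).getD "") - 1
  let y1min := y1
  let y1max := y1 + (s1.length : Int) - 1
  let x2min := x2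
  let x2max := x2 + PySem.Str.len ((PySem.List.pyGet? s2 0).getD "") - 1
  let y2min := y2
  let y2max := y2 + (s2.length : Int) - 1
  if x2max < x1min ∨ x2min > x1max then false
  else if y2max < y1min ∨ y2min > y1max then false
  else
    (PySem.List.enumerate s2).any (fun yr =>
      let yg := yr.1 + y2min
      let yy := yg - y1min
      if yy < 0 ∨ yy ≥ (s1.length : Int) then false
      else
        (PySem.List.enumerate yr.2.toList).any (fun xc =>
          if xc.2 == '0' then false
          else
            let xg := xc.1 + x2min
            let xx := xg - x1min
            if xx < 0 ∨ xx ≥ PySem.Str.len ((PySem.List.pyGet? s1 0).getD "") then false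
            else
              match PySem.List.pyGet? s1 yy with
              | none => false
              | some r =>
                match PySem.Str.pyGet? r xx with
                | none => false
                | some ch => ch == '1'))

def solution (sprites : List (List String)) (instances : List (Int × Int × Int)) : Int :=
  let n : Int := instances.length
  let collisions :=
    (PySem.List.pyRange 0 n).foldl (fun acc i =>
      (PySem.List.pyRange (i + 1) n).foldl (fun acc j =>
        let t1 := (PySem.List.pyGet? instances i).getD (0, 0, 0)
        let t2 := (PySem.List.pyGet? instances j).getD (0, 0, 0)
        let s1 := (PySem.List.pyGet? sprites t1.1).getD []
        let s2 := (PySem.List.pyGet? sprites t2.1).getD []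
        if is_collision s1 t1.2.1 t1.2.2 s2 t2.2.1 t2.2.2 then PySem.Set.add acc (i, j)
        else acc) acc)
      (PySem.Set.empty : PySem.Set (Int × Int))
  PySem.Set.len collisions

-- ===== PORT B =====
-- one pixel of the row scan: skip '0', record the global coordinate in the
-- non-zero set and (if '1') in the ones set
def rowStep (x y : Int) (oz : PySem.Set (Int × Int) × PySem.Set (Int × Int)) (xc : Int × Char) :
    PySem.Set (Int × Int) × PySem.Set (Int × Int) :=
  if xc.2 == '0' then oz
  else ((if xc.2 == '1' then PySem.Set.add oz.1 (x + xc.1, y) else oz.1),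
        PySem.Set.add oz.2 (x + xc.1, y))

def pixelSets (sprites : List (List String)) (t : Int × Int × Int) :
    PySem.Set (Int × Int) × PySem.Set (Int × Int) :=
  (PySem.List.enumerate ((PySem.List.pyGet? sprites t.1).getD [])).foldl
    (fun oz yr => (PySem.List.enumerate yr.2.toList).foldl (rowStep t.2.1 (t.2.2 + yr.1)) oz)
    (PySem.Set.empty, PySem.Set.empty)

def solution_alt (sprites : List (List String)) (instances : List (Int × Int × Int)) : Int :=
  let n : Int := instances.length
  if n < 2 then 0
  else
  let pixels := instances.foldl (fun acc t => acc ++ [pixelSets sprites t]) []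
  (PySem.List.pyRange 0 n).foldl (fun total i =>
    let oi := ((PySem.List.pyGet? pixels i).getD (PySem.Set.empty, PySem.Set.empty)).1
    (PySem.List.pyRange (i + 1) n).foldl (fun total j =>
      if (PySem.Set.inter oi
            ((PySem.List.pyGet? pixels j).getD (PySem.Set.empty, PySem.Set.empty)).2).isEmpty
      then total else total + 1) total) 0

-- ===== PRECONDITION & SPEC =====
-- a sprite as A's bounding-box logic assumes it: nonempty, all rows as wide as row 0
def rectSprite (s : List String) : Bool :=
  !s.isEmpty && s.all (fun r => PySem.Str.len r == PySem.Str.len (s.headD ""))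

-- When at least one pair exists, Pre_ excludes instances whose sprite id is out of range or whose sprite is empty (A raises
-- IndexError there), and ragged sprites (rows of unequal width), on which A either raises
-- IndexError or returns an accidental value driven by row 0's width (see cites).
def Pre_solution (sprites : List (List String)) (instances : List (Int × Int × Int)) : Prop :=
  (instances.length : Int) < 2 ∨ ∀ t ∈ instances, (-(sprites.length : Int) ≤ t.1 ∧ t.1 < (sprites.length : Int)) ∧
    rectSprite ((PySem.List.pyGet? sprites t.1).getD []) = true
instance (sprites : List (List String)) (instances : List (Int × Int × Int)) : Decidable (Pre_solution sprites instances) := by unfold Pre_solution; infer_instance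

def pvWitness_solution : List (List String) × (List (Int × Int × Int)) :=
  ([["10", "01"], ["11"]], [(0, 0, 0), (1, 1, 1), (0, 2, 0)])

def Spec_solution (sprites : List (List String)) (instances : List (Int × Int × Int)) (out : Int) : Prop := out = solution_alt sprites instances
instance (sprites : List (List String)) (instances : List (Int × Int × Int)) (out : Int) : Decidable (Spec_solution sprites instances out) := by unfold Spec_solution; infer_instance

-- ===== CLAIM (what is proved, stated in full; the proofs are below) =====
def Claim_equal_solution : Prop := ∀ (sprites : List (List String)) (instances : List (Int × Int × Int)), Dom_solution sprites instances → Pre_solution sprites instances → Spec_solution sprites instances (solution sprites instances)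

-- ===== LEMMAS AND PROOFS =====

-- proof-side views of what each port tests for the pair (i, j)
def instAt (instances : List (Int × Int × Int)) (i : Int) : Int × Int × Int :=
  (PySem.List.pyGet? instances i).getD (0, 0, 0)

def sprOf (sprites : List (List String)) (t : Int × Int × Int) : List String :=
  (PySem.List.pyGet? sprites t.1).getD []

def predA (sprites : List (List String)) (instances : List (Int × Int × Int)) (i j : Int) : Bool :=
  is_collision (sprOf sprites (instAt instances i)) (instAt instances i).2.1 (instAt instances i).2.2
    (sprOf sprites (instAt instances j)) (instAt instances j).2.1 (instAt instances j).2.2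

def predB (sprites : List (List String)) (instances : List (Int × Int × Int)) (i j : Int) : Bool :=
  !(PySem.Set.inter (pixelSets sprites (instAt instances i)).1
      (pixelSets sprites (instAt instances j)).2).isEmpty

theorem pyRange_nodup (a b : Int) : (PySem.List.pyRange a b).Nodup := by
  rw [PySem.List.pyRange_of_pos a b (by norm_num)]
  apply List.Nodup.map
  · intro x y h; simp only [one_mul] at h; omega
  · exact List.nodup_range
theorem setfold_inner (P : Int → Bool) (i : Int) (js : List Int) (acc : List (Int × Int))
    (hnd : js.Nodup) (hf : ∀ j ∈ js, (i, j) ∉ acc) :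
    js.foldl (fun acc j => if P j then PySem.Set.add acc (i, j) else acc) acc
      = acc ++ (js.filter P).map (fun j => (i, j)) := by
  induction js generalizing acc with
  | nil => simp
  | cons j t ih =>
    simp only [List.foldl_cons, List.filter_cons]
    by_cases hp : P j
    · rw [if_pos hp, if_pos hp, PySem.Set.add_of_not_mem (hf j (by simp))]
      rw [ih (acc ++ [(i, j)]) hnd.of_cons ?_]
      · simp
      · intro j' hj'
        simp only [List.mem_append, List.mem_singleton, not_or]
        refine ⟨hf j' (List.mem_cons_of_mem _ hj'), ?_⟩
        intro h
        have hj : j' = j := (Prod.ext_iff.1 h).2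
        exact (List.nodup_cons.1 hnd).1 (hj ▸ hj')
    · rw [if_neg hp, if_neg hp]
      exact ih acc hnd.of_cons (fun j' hj' => hf j' (List.mem_cons_of_mem _ hj'))

theorem setfold_outer (P : Int → Int → Bool) (J : Int → List Int) (is : List Int)
    (acc : List (Int × Int)) (hnd : is.Nodup) (hJ : ∀ i, (J i).Nodup)
    (hacc : ∀ p ∈ acc, p.1 ∉ is) :
    is.foldl (fun acc i => (J i).foldl (fun acc j => if P i j then PySem.Set.add acc (i, j) else acc) acc) acc
      = acc ++ is.flatMap (fun i => ((J i).filter (P i)).map (fun j => (i, j))) := by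
  induction is generalizing acc with
  | nil => simp
  | cons i t ih =>
    simp only [List.foldl_cons, List.flatMap_cons]
    rw [setfold_inner (P i) i (J i) acc (hJ i) ?_]
    · rw [ih _ hnd.of_cons ?_]
      · simp
      · intro p hp
        rcases List.mem_append.1 hp with h | h
        · exact fun hm => hacc p h (List.mem_cons_of_mem _ hm)
        · obtain ⟨j, hj, rfl⟩ := List.mem_map.1 h
          exact (List.nodup_cons.1 hnd).1
    · intro j hj hmem
      exact hacc _ hmem (by simp)

theorem solution_eq_sum (sprites : List (List String)) (instances : List (Int × Int × Int)) :
    solution sprites instances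
      = ((PySem.List.pyRange 0 (instances.length : Int)).map
          (fun i => ((PySem.List.pyRange (i + 1) (instances.length : Int)).countP
            (fun j => predA sprites instances i j) : Int))).sum := by
  show PySem.Set.len
      ((PySem.List.pyRange 0 (instances.length : Int)).foldl (fun acc i =>
        (PySem.List.pyRange (i + 1) (instances.length : Int)).foldl
          (fun acc j => if predA sprites instances i j then PySem.Set.add acc (i, j) else acc) acc)
        (PySem.Set.empty : PySem.Set (Int × Int))) = _
  rw [setfold_outer (fun i j => predA sprites instances i j)
    (fun i => PySem.List.pyRange (i + 1) (instances.length : Int)) _ _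
    (pyRange_nodup _ _) (fun i => pyRange_nodup _ _) (by simp [PySem.Set.empty])]
  simp only [PySem.Set.len, PySem.Set.empty, List.nil_append, List.length_flatMap]
  rw [Nat.cast_list_sum]
  congr 1
  simp [Function.comp, List.countP_eq_length_filter]

theorem getAt_map {α β : Type} (f : α → β) (xs : List α) (j : Int) (h0 : 0 ≤ j)
    (h : j < (xs.length : Int)) (d : β) (d' : α) :
    (PySem.List.pyGet? (xs.map f) j).getD d = f ((PySem.List.pyGet? xs j).getD d') := by
  have hk : j = ((j.toNat : Nat) : Int) := (Int.toNat_of_nonneg h0).symm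
  rw [hk, PySem.List.pyGet?_natCast, PySem.List.pyGet?_natCast]
  have hlt : j.toNat < xs.length := by omega
  simp [List.getElem?_map, List.getElem?_eq_getElem hlt]


theorem foldl_count_outer (F : Int → Int → Bool) (J : Int → List Int) (is : List Int) (a : Int) :
    is.foldl (fun total i => (J i).foldl (fun total j => if F i j then total else total + 1) total) a
      = a + (is.map (fun i => ((J i).countP (fun j => !F i j) : Int))).sum := by
  induction is generalizing a with
  | nil => simp
  | cons i t ih =>
    simp only [List.foldl_cons, List.map_cons, List.sum_cons]
    have hfun : (fun (total j : Int) => if F i j then total else total + 1)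
        = (fun (total j : Int) => if (!F i j) then total + 1 else total) := by
      funext total j
      by_cases h : F i j <;> simp [h]
    rw [hfun, PySem.List.foldl_if_add_one, ih]
    ring

theorem solution_alt_eq_sum (sprites : List (List String)) (instances : List (Int × Int × Int))
    (hn : ¬ ((instances.length : Int) < 2)) :
    solution_alt sprites instances
      = ((PySem.List.pyRange 0 (instances.length : Int)).map
          (fun i => ((PySem.List.pyRange (i + 1) (instances.length : Int)).countP
            (fun j => predB sprites instances i j) : Int))).sum := by
  unfold solution_alt
  rw [if_neg hn]
  rw [PySem.List.foldl_append_singleton_eq_map (pixelSets sprites) instances []]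
  simp only [List.nil_append]
  refine Eq.trans (foldl_count_outer (fun i j =>
      (PySem.Set.inter ((PySem.List.pyGet? (instances.map (pixelSets sprites)) i).getD
          (PySem.Set.empty, PySem.Set.empty)).1
        ((PySem.List.pyGet? (instances.map (pixelSets sprites)) j).getD
          (PySem.Set.empty, PySem.Set.empty)).2).isEmpty)
      (fun i => PySem.List.pyRange (i + 1) (instances.length : Int))
      (PySem.List.pyRange 0 (instances.length : Int)) 0) ?_
  rw [zero_add]
  congr 1
  apply List.map_congr_left
  intro i hi
  have hi' := PySem.List.mem_pyRange_one.1 hi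
  congr 1
  apply List.countP_congr
  intro j hj
  have hj' := PySem.List.mem_pyRange_one.1 hj
  rw [getAt_map (pixelSets sprites) instances i hi'.1 hi'.2 _ (0,0,0),
      getAt_map (pixelSets sprites) instances j (by omega) hj'.2 _ (0,0,0)]
  unfold predB instAt
  constructor <;> intro h <;> simpa using h

theorem rowfold_snd_mem (x y : Int) (row : List Char) :
    ∀ (s : Int) (oz : PySem.Set (Int × Int) × PySem.Set (Int × Int)) (p : Int × Int),
    (p ∈ ((PySem.List.enumerate row s).foldl (rowStep x y) oz).2 ↔
      p ∈ oz.2 ∨ ∃ m : Nat, ∃ _ : m < row.length, row[m] ≠ '0' ∧ p = (x + (s + m), y)) := by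
  induction row with
  | nil => intro s oz p; simp [PySem.List.enumerate]
  | cons c t ih =>
    intro s oz p
    have hcons : PySem.List.enumerate (c :: t) s = (s, c) :: PySem.List.enumerate t (s + 1) := by
      simp [PySem.List.enumerate]
    rw [hcons, List.foldl_cons, ih (s + 1)]
    have hstep : p ∈ (rowStep x y oz (s, c)).2 ↔ p ∈ oz.2 ∨ (c ≠ '0' ∧ p = (x + s, y)) := by
      unfold rowStep
      by_cases h0 : c = '0'
      · simp [h0]
      · by_cases h1 : c = '1' <;>
          simp [h0, h1, PySem.Set.mem_add]
    rw [hstep]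
    constructor
    · rintro (⟨h | ⟨hne, rfl⟩⟩ | ⟨m, hm, hne, rfl⟩)
      · exact Or.inl h
      · exact Or.inr ⟨0, by simp, by simpa using hne, by simp⟩
      · refine Or.inr ⟨m + 1, by simpa using hm, by simpa using hne, ?_⟩
        simp only [Prod.mk.injEq, and_true]
        push_cast; ring
    · rintro (h | ⟨m, hm, hne, rfl⟩)
      · exact Or.inl (Or.inl h)
      · match m with
        | 0 => exact Or.inl (Or.inr ⟨by simpa using hne, by simp⟩)
        | Nat.succ m' =>
          refine Or.inr ⟨m', by simp at hm; omega, by simpa using hne, ?_⟩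
          simp only [Prod.mk.injEq, and_true]
          push_cast; ring

theorem rowfold_fst_mem (x y : Int) (row : List Char) :
    ∀ (s : Int) (oz : PySem.Set (Int × Int) × PySem.Set (Int × Int)) (p : Int × Int),
    (p ∈ ((PySem.List.enumerate row s).foldl (rowStep x y) oz).1 ↔
      p ∈ oz.1 ∨ ∃ m : Nat, ∃ _ : m < row.length, row[m] = '1' ∧ p = (x + (s + m), y)) := by
  induction row with
  | nil => intro s oz p; simp [PySem.List.enumerate]
  | cons c t ih =>
    intro s oz p
    have hcons : PySem.List.enumerate (c :: t) s = (s, c) :: PySem.List.enumerate t (s + 1) := by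
      simp [PySem.List.enumerate]
    rw [hcons, List.foldl_cons, ih (s + 1)]
    have hstep : p ∈ (rowStep x y oz (s, c)).1 ↔ p ∈ oz.1 ∨ (c = '1' ∧ p = (x + s, y)) := by
      unfold rowStep
      by_cases h0 : c = '0'
      · simp [h0]
      · by_cases h1 : c = '1' <;> simp [h0, h1, PySem.Set.mem_add]
    rw [hstep]
    constructor
    · rintro (⟨h | ⟨hne, rfl⟩⟩ | ⟨m, hm, hne, rfl⟩)
      · exact Or.inl h
      · exact Or.inr ⟨0, by simp, by simpa using hne, by simp⟩
      · refine Or.inr ⟨m + 1, by simpa using hm, by simpa using hne, ?_⟩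
        simp only [Prod.mk.injEq, and_true]
        push_cast; ring
    · rintro (h | ⟨m, hm, hne, rfl⟩)
      · exact Or.inl (Or.inl h)
      · match m with
        | 0 => exact Or.inl (Or.inr ⟨by simpa using hne, by simp⟩)
        | Nat.succ m' =>
          refine Or.inr ⟨m', by simp at hm; omega, by simpa using hne, ?_⟩
          simp only [Prod.mk.injEq, and_true]
          push_cast; ring

theorem spritefold_snd_mem (x y : Int) (rows : List String) :
    ∀ (s : Int) (oz : PySem.Set (Int × Int) × PySem.Set (Int × Int)) (p : Int × Int),
    (p ∈ ((PySem.List.enumerate rows s).foldl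
        (fun oz yr => (PySem.List.enumerate yr.2.toList).foldl (rowStep x (y + yr.1)) oz) oz).2 ↔
      p ∈ oz.2 ∨ ∃ k : Nat, ∃ _ : k < rows.length, ∃ m : Nat, ∃ _ : m < (rows[k]).toList.length,
        (rows[k]).toList[m] ≠ '0' ∧ p = (x + m, y + (s + k))) := by
  induction rows with
  | nil => intro s oz p; simp [PySem.List.enumerate]
  | cons r rs ih =>
    intro s oz p
    have hcons : PySem.List.enumerate (r :: rs) s = (s, r) :: PySem.List.enumerate rs (s + 1) := by
      simp [PySem.List.enumerate]
    rw [hcons, List.foldl_cons, ih (s + 1)]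
    rw [rowfold_snd_mem x (y + s) r.toList 0]
    constructor
    · rintro (⟨h | ⟨m, hm, hne, rfl⟩⟩ | ⟨k, hk, m, hm, hne, rfl⟩)
      · exact Or.inl h
      · exact Or.inr ⟨0, by simp, m, by simpa using hm, by simpa using hne, by simp⟩
      · refine Or.inr ⟨k + 1, by simpa using hk, m, by simpa using hm, by simpa using hne, ?_⟩
        simp only [Prod.mk.injEq, true_and]
        push_cast; ring
    · rintro (h | ⟨k, hk, m, hm, hne, rfl⟩)
      · exact Or.inl (Or.inl h)
      · match k with
        | 0 =>
          refine Or.inl (Or.inr ⟨m, by simpa using hm, by simpa using hne, ?_⟩)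
          simp
        | Nat.succ k' =>
          refine Or.inr ⟨k', by simp at hk; omega, m, by simpa using hm, by simpa using hne, ?_⟩
          simp only [Prod.mk.injEq, true_and]
          push_cast; ring

theorem spritefold_fst_mem (x y : Int) (rows : List String) :
    ∀ (s : Int) (oz : PySem.Set (Int × Int) × PySem.Set (Int × Int)) (p : Int × Int),
    (p ∈ ((PySem.List.enumerate rows s).foldl
        (fun oz yr => (PySem.List.enumerate yr.2.toList).foldl (rowStep x (y + yr.1)) oz) oz).1 ↔
      p ∈ oz.1 ∨ ∃ k : Nat, ∃ _ : k < rows.length, ∃ m : Nat, ∃ _ : m < (rows[k]).toList.length,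
        (rows[k]).toList[m] = '1' ∧ p = (x + m, y + (s + k))) := by
  induction rows with
  | nil => intro s oz p; simp [PySem.List.enumerate]
  | cons r rs ih =>
    intro s oz p
    have hcons : PySem.List.enumerate (r :: rs) s = (s, r) :: PySem.List.enumerate rs (s + 1) := by
      simp [PySem.List.enumerate]
    rw [hcons, List.foldl_cons, ih (s + 1)]
    rw [rowfold_fst_mem x (y + s) r.toList 0]
    constructor
    · rintro (⟨h | ⟨m, hm, hne, rfl⟩⟩ | ⟨k, hk, m, hm, hne, rfl⟩)
      · exact Or.inl h
      · exact Or.inr ⟨0, by simp, m, by simpa using hm, by simpa using hne, by simp⟩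
      · refine Or.inr ⟨k + 1, by simpa using hk, m, by simpa using hm, by simpa using hne, ?_⟩
        simp only [Prod.mk.injEq, true_and]
        push_cast; ring
    · rintro (h | ⟨k, hk, m, hm, hne, rfl⟩)
      · exact Or.inl (Or.inl h)
      · match k with
        | 0 =>
          refine Or.inl (Or.inr ⟨m, by simpa using hm, by simpa using hne, ?_⟩)
          simp
        | Nat.succ k' =>
          refine Or.inr ⟨k', by simp at hk; omega, m, by simpa using hm, by simpa using hne, ?_⟩
          simp only [Prod.mk.injEq, true_and]
          push_cast; ring

theorem pixel_snd_mem (sprites : List (List String)) (t : Int × Int × Int) (p : Int × Int) :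
    (p ∈ (pixelSets sprites t).2 ↔
      ∃ k : Nat, ∃ _ : k < (sprOf sprites t).length,
      ∃ m : Nat, ∃ _ : m < ((sprOf sprites t)[k]).toList.length,
        ((sprOf sprites t)[k]).toList[m] ≠ '0' ∧ p = (t.2.1 + m, t.2.2 + k)) := by
  unfold pixelSets
  rw [spritefold_snd_mem t.2.1 t.2.2 ((PySem.List.pyGet? sprites t.1).getD []) 0
    (PySem.Set.empty, PySem.Set.empty) p]
  unfold sprOf
  simp [PySem.Set.empty]

theorem pixel_fst_mem (sprites : List (List String)) (t : Int × Int × Int) (p : Int × Int) :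
    (p ∈ (pixelSets sprites t).1 ↔
      ∃ k : Nat, ∃ _ : k < (sprOf sprites t).length,
      ∃ m : Nat, ∃ _ : m < ((sprOf sprites t)[k]).toList.length,
        ((sprOf sprites t)[k]).toList[m] = '1' ∧ p = (t.2.1 + m, t.2.2 + k)) := by
  unfold pixelSets
  rw [spritefold_fst_mem t.2.1 t.2.2 ((PySem.List.pyGet? sprites t.1).getD []) 0
    (PySem.Set.empty, PySem.Set.empty) p]
  unfold sprOf
  simp [PySem.Set.empty]

theorem rect_ne_nil {s : List String} (h : rectSprite s = true) : s ≠ [] := by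
  unfold rectSprite at h
  simp only [Bool.and_eq_true, Bool.not_eq_true'] at h
  exact fun hn => by simp [hn] at h

theorem rect_width {s : List String} (h : rectSprite s = true) (k : Nat) (hk : k < s.length) :
    ((s[k]).toList.length : Int) = PySem.Str.len ((PySem.List.pyGet? s 0).getD "") := by
  have hne := rect_ne_nil h
  have h0 : 0 < s.length := List.length_pos_of_ne_nil hne
  have hget : PySem.List.pyGet? s 0 = some (s[0]) := by
    have : ((0 : Nat) : Int) = (0 : Int) := by norm_num
    rw [← this, PySem.List.pyGet?_natCast, List.getElem?_eq_getElem h0]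
  rw [hget]
  unfold rectSprite at h
  simp only [Bool.and_eq_true, List.all_eq_true, beq_iff_eq] at h
  have hk' := h.2 (s[k]) (List.getElem_mem hk)
  have hhead : s.headD "" = s[0] := by
    cases s with
    | nil => exact absurd rfl hne
    | cons a t => rfl
  rw [hhead] at hk'
  simp only [Option.getD_some]
  rw [PySem.Str.len_eq] at hk' ⊢
  exact hk'

theorem collide_iff (s1 s2 : List String) (x1 y1 x2 y2 : Int)
    (h1 : rectSprite s1 = true) (h2 : rectSprite s2 = true) :
    (is_collision s1 x1 y1 s2 x2 y2 = true ↔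
      ∃ k1 : Nat, ∃ _ : k1 < s1.length, ∃ m1 : Nat, ∃ _ : m1 < (s1[k1]).toList.length,
      ∃ k2 : Nat, ∃ _ : k2 < s2.length, ∃ m2 : Nat, ∃ _ : m2 < (s2[k2]).toList.length,
        (s1[k1]).toList[m1] = '1' ∧ (s2[k2]).toList[m2] ≠ '0' ∧
        x1 + m1 = x2 + m2 ∧ y1 + k1 = y2 + k2) := by
  have hW1 := rect_width h1
  have hW2 := rect_width h2
  simp only [is_collision]
  set w1 := PySem.Str.len ((PySem.List.pyGet? s1 0).getD "") with hw1
  set w2 := PySem.Str.len ((PySem.List.pyGet? s2 0).getD "") with hw2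
  by_cases hA : (x2 + w2 - 1 < x1 ∨ x2 > x1 + w1 - 1)
  · rw [if_pos hA]
    constructor
    · intro h; exact absurd h (by simp)
    · rintro ⟨k1, hk1, m1, hm1, k2, hk2, m2, hm2, hc1, hc2, hx, hy⟩
      have b1 : (m1 : Int) < w1 := by rw [← hW1 k1 hk1]; exact_mod_cast hm1
      have b2 : (m2 : Int) < w2 := by rw [← hW2 k2 hk2]; exact_mod_cast hm2
      exfalso; omega
  · rw [if_neg hA]
    by_cases hB : (y2 + (s2.length : Int) - 1 < y1 ∨ y2 > y1 + (s1.length : Int) - 1)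
    · rw [if_pos hB]
      constructor
      · intro h; exact absurd h (by simp)
      · rintro ⟨k1, hk1, m1, hm1, k2, hk2, m2, hm2, hc1, hc2, hx, hy⟩
        exfalso; omega
    · rw [if_neg hB, List.any_eq_true]
      constructor
      · rintro ⟨yr, hyr, hfy⟩
        obtain ⟨k2, hk2, rfl⟩ := (PySem.List.mem_enumerate_iff _ _ _).1 hyr
        simp only at hfy
        by_cases hg : ((0 : Int) + k2 + y2 - y1 < 0 ∨ (0 : Int) + k2 + y2 - y1 ≥ (s1.length : Int))
        · rw [if_pos hg] at hfy; exact absurd hfy (by simp)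
        · rw [if_neg hg, List.any_eq_true] at hfy
          obtain ⟨xc, hxc, hfx⟩ := hfy
          obtain ⟨m2, hm2, rfl⟩ := (PySem.List.mem_enumerate_iff _ _ _).1 hxc
          simp only at hfx
          by_cases hc0 : ((s2[k2]).toList[m2] == '0')
          · rw [if_pos hc0] at hfx; exact absurd hfx (by simp)
          · rw [if_neg hc0] at hfx
            by_cases hgx : ((0 : Int) + m2 + x2 - x1 < 0 ∨ (0 : Int) + m2 + x2 - x1 ≥ w1)
            · rw [if_pos hgx] at hfx; exact absurd hfx (by simp)
            · rw [if_neg hgx] at hfx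
              push Not at hg hgx
              set yy := (0 : Int) + k2 + y2 - y1 with hyy
              set xx := (0 : Int) + m2 + x2 - x1 with hxx
              have hyy0 : 0 ≤ yy := by omega
              have hyyl : yy < (s1.length : Int) := by omega
              have hk1 : yy.toNat < s1.length := by omega
              have hget1 : PySem.List.pyGet? s1 yy = some (s1[yy.toNat]) := by
                have he : PySem.List.pyGet? s1 yy
                    = PySem.List.pyGet? s1 ((yy.toNat : Nat) : Int) := by
                  rw [Int.toNat_of_nonneg hyy0]
                rw [he, PySem.List.pyGet?_natCast, List.getElem?_eq_getElem hk1]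

              have hxx0 : 0 ≤ xx := by omega
              have hm1 : xx.toNat < (s1[yy.toNat]).toList.length := by
                have := hW1 yy.toNat hk1
                omega
              have hget2 : PySem.Str.pyGet? (s1[yy.toNat]) xx
                  = some ((s1[yy.toNat]).toList[xx.toNat]) := by
                have he : PySem.Str.pyGet? (s1[yy.toNat]) xx
                    = PySem.Str.pyGet? (s1[yy.toNat]) ((xx.toNat : Nat) : Int) := by
                  rw [Int.toNat_of_nonneg hxx0]
                rw [he, PySem.Str.pyGet?_natCast, List.getElem?_eq_getElem hm1]
              simp only [hget1, hget2] at hfx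
              refine ⟨yy.toNat, hk1, xx.toNat, hm1, k2, hk2, m2, hm2, by simpa using hfx,
                by simpa using hc0, by omega, by omega⟩
      · rintro ⟨k1, hk1, m1, hm1, k2, hk2, m2, hm2, hc1, hc2, hx, hy⟩
        refine ⟨((0 : Int) + k2, s2[k2]), (PySem.List.mem_enumerate_iff _ _ _).2 ⟨k2, hk2, rfl⟩, ?_⟩
        simp only
        have hyy : (0 : Int) + k2 + y2 - y1 = (k1 : Int) := by omega
        rw [if_neg (by rw [hyy]; push Not; constructor <;> [omega; exact_mod_cast hk1])]
        rw [List.any_eq_true]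
        refine ⟨((0 : Int) + m2, (s2[k2]).toList[m2]),
          (PySem.List.mem_enumerate_iff _ _ _).2 ⟨m2, hm2, rfl⟩, ?_⟩
        simp only
        rw [if_neg (by simpa using hc2)]
        have hxx : (0 : Int) + m2 + x2 - x1 = (m1 : Int) := by omega
        have hm1w : (m1 : Int) < w1 := by rw [← hW1 k1 hk1]; exact_mod_cast hm1
        rw [if_neg (by rw [hxx]; push Not; omega)]
        rw [hyy, hxx]
        have hget1 : PySem.List.pyGet? s1 (k1 : Int) = some (s1[k1]) := by
          rw [PySem.List.pyGet?_natCast, List.getElem?_eq_getElem hk1]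
        have hget2 : PySem.Str.pyGet? (s1[k1]) (m1 : Int) = some ((s1[k1]).toList[m1]) := by
          rw [PySem.Str.pyGet?_natCast, List.getElem?_eq_getElem hm1]
        simp only [hget1]
        simp only [hget2]
        simp [hc1]

theorem pred_eq (sprites : List (List String)) (instances : List (Int × Int × Int))
    (hAll : ∀ t ∈ instances, (-(sprites.length : Int) ≤ t.1 ∧ t.1 < (sprites.length : Int)) ∧
      rectSprite ((PySem.List.pyGet? sprites t.1).getD []) = true) (i j : Int)
    (hi : i ∈ PySem.List.pyRange 0 (instances.length : Int))
    (hj : j ∈ PySem.List.pyRange (i + 1) (instances.length : Int)) :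
    predA sprites instances i j = predB sprites instances i j := by
  have hi' := PySem.List.mem_pyRange_one.1 hi
  have hj' := PySem.List.mem_pyRange_one.1 hj
  have hmem : ∀ k : Int, 0 ≤ k → k < (instances.length : Int) → instAt instances k ∈ instances := by
    intro k hk0 hkl
    unfold instAt
    have hk : k.toNat < instances.length := by omega
    have he : PySem.List.pyGet? instances k
        = PySem.List.pyGet? instances ((k.toNat : Nat) : Int) := by
      rw [Int.toNat_of_nonneg hk0]
    rw [he, PySem.List.pyGet?_natCast, List.getElem?_eq_getElem hk]
    exact List.getElem_mem hk
  have hmi := hmem i hi'.1 hi'.2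
  have hmj := hmem j (by omega) hj'.2
  have hrect1 : rectSprite (sprOf sprites (instAt instances i)) = true := (hAll _ hmi).2
  have hrect2 : rectSprite (sprOf sprites (instAt instances j)) = true := (hAll _ hmj).2
  rw [Bool.eq_iff_iff]
  unfold predA
  rw [collide_iff _ _ _ _ _ _ hrect1 hrect2]
  unfold predB
  have hne : (!(PySem.Set.inter (pixelSets sprites (instAt instances i)).1
      (pixelSets sprites (instAt instances j)).2).isEmpty) = true
      ↔ ∃ p, p ∈ PySem.Set.inter (pixelSets sprites (instAt instances i)).1
          (pixelSets sprites (instAt instances j)).2 := by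
    cases (PySem.Set.inter (pixelSets sprites (instAt instances i)).1
      (pixelSets sprites (instAt instances j)).2) <;> simp
  rw [hne]
  constructor
  · rintro ⟨k1, hk1, m1, hm1, k2, hk2, m2, hm2, hc1, hc2, hx, hy⟩
    refine ⟨((instAt instances i).2.1 + m1, (instAt instances i).2.2 + k1), ?_⟩
    rw [PySem.Set.mem_inter]
    constructor
    · exact (pixel_fst_mem _ _ _).2 ⟨k1, hk1, m1, hm1, hc1, rfl⟩
    · refine (pixel_snd_mem _ _ _).2 ⟨k2, hk2, m2, hm2, hc2, ?_⟩
      simp only [Prod.mk.injEq]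
      omega
  · rintro ⟨p, hp⟩
    rw [PySem.Set.mem_inter] at hp
    obtain ⟨k1, hk1, m1, hm1, hc1, hp1⟩ := (pixel_fst_mem _ _ _).1 hp.1
    obtain ⟨k2, hk2, m2, hm2, hc2, hp2⟩ := (pixel_snd_mem _ _ _).1 hp.2
    refine ⟨k1, hk1, m1, hm1, k2, hk2, m2, hm2, hc1, hc2, ?_, ?_⟩ <;>
      (rw [hp1] at hp2; simp only [Prod.mk.injEq] at hp2; omega)

theorem solution_small (sprites : List (List String)) (instances : List (Int × Int × Int))
    (h : (instances.length : Int) < 2) : solution sprites instances = 0 := by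
  rw [solution_eq_sum]
  apply List.sum_eq_zero
  intro x hx
  obtain ⟨i, hi, rfl⟩ := List.mem_map.1 hx
  have hi' := PySem.List.mem_pyRange_one.1 hi
  have hnil : PySem.List.pyRange (i + 1) (instances.length : Int) = [] := by
    apply List.eq_nil_of_length_eq_zero
    rw [PySem.List.length_pyRange_one]
    omega
  rw [hnil]
  simp

-- ===== VERDICT (by name: the statement is the Claim_ definition above) =====
theorem solution_spec : Claim_equal_solution := by
  intro sprites instances _hDom hPre
  unfold Spec_solution
  by_cases hn : (instances.length : Int) < 2
  · rw [solution_small sprites instances hn]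
    simp only [solution_alt]
    rw [if_pos hn]
  · have hAll := hPre.resolve_left hn
    rw [solution_eq_sum, solution_alt_eq_sum sprites instances hn]
    congr 1
    apply List.map_congr_left
    intro i hi
    congr 1
    apply List.countP_congr
    intro j hj
    rw [pred_eq sprites instances hAll i j hi hj]
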